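-- pv_equiv track=rewrite | github.com/cj-torres/complex_hierarchy | language_builders.py | anbn_checker
-- ===== SOURCE A (Python) =====
-- def anbn_checker(string):
--     counter = 0
--     switch = False
--     for s in string:
--         if s == "a":
--             if switch:
--                 return False
--             counter += 1
--         if s == "b":
--             counter -= 1
--             switch = True
--     if counter != 0:
--         return False
--     else:
--         return True
-- ===== SOURCE B (Python) =====
-- def anbn_checker(string):
--     na = string.count('a')
--     nb = string.count('b')
--     filtered = ''.join(c for c in string if c in 'ab')
--     return na == nb and filtered == 'a' * na + 'b' * nb
-- ===== Notes on version B (the rewrite author's own statement) =====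
-- stated objective: idiomatic
-- what changed: Replaces the stateful counter/switch scan with early return by counting the two letters, filtering the string to just those letters, and comparing it with the canonical sorted form built from the counts.
import Mathlib
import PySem

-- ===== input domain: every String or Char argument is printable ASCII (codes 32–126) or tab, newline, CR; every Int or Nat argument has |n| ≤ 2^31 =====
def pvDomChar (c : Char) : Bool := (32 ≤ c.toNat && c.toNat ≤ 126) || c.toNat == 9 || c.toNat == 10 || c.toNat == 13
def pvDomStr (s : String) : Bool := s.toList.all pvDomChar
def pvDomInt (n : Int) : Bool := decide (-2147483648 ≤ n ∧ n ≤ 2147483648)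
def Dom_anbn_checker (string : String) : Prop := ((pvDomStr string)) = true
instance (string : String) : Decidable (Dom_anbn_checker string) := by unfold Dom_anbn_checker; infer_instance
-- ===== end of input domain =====

-- B builds the canonical form from letter counts and compares, instead of the counter/switch scan; equivalence is exact and total.

-- ===== PORT A =====
-- literal port of A's loop: counter, switch, early return on 'a' after 'b'
def anbnGo : List Char → Int → Bool → Bool
  | [], counter, _ => counter == 0
  | s :: rest, counter, switch =>
    if s == 'a' then
      if switch then false else anbnGo rest (counter + 1) switch
    else if s == 'b' then anbnGo rest (counter - 1) true
    else anbnGo rest counter switch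

def anbn_checker (string : String) : Bool := anbnGo string.toList 0 false

-- ===== PORT B =====
def anbn_checker_alt (string : String) : Bool :=
  let cs := string.toList
  let na := cs.count 'a'
  let nb := cs.count 'b'
  let filtered := cs.filter (fun c => c == 'a' || c == 'b')
  na == nb && filtered == List.replicate na 'a' ++ List.replicate nb 'b'

-- ===== PRECONDITION & SPEC =====
def Spec_anbn_checker (string : String) (out : Bool) : Prop := out = anbn_checker_alt string
instance (string : String) (out : Bool) : Decidable (Spec_anbn_checker string out) := by unfold Spec_anbn_checker; infer_instance

-- ===== CLAIM (what is proved, stated in full; the proofs are below) =====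
def Claim_equal_anbn_checker : Prop := ∀ (string : String), Dom_anbn_checker string → Spec_anbn_checker string (anbn_checker string)

-- ===== LEMMAS AND PROOFS =====

-- "filtered string is in canonical a^na b^nb form"
def okB (l : List Char) : Bool :=
  l.filter (fun c => c == 'a' || c == 'b') ==
    List.replicate (l.count 'a') 'a' ++ List.replicate (l.count 'b') 'b'

theorem filter_of_no_a (l : List Char) (h : l.count 'a' = 0) :
    l.filter (fun c => c == 'a' || c == 'b') = List.replicate (l.count 'b') 'b' := by
  induction l with
  | nil => simp
  | cons x xs ih =>
    have hx : x ≠ 'a' := by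
      intro hxa; subst hxa; simp at h
    have h' : xs.count 'a' = 0 := by
      simpa [List.count_cons, hx] using h
    by_cases hb : x = 'b'
    · subst hb; simp [List.replicate_succ, ih h']
    · simp [hx, hb, ih h']

theorem okB_cons_a (xs : List Char) : okB ('a' :: xs) = okB xs := by
  simp [okB, List.replicate_succ]

theorem okB_cons_b (xs : List Char) : okB ('b' :: xs) = decide (xs.count 'a' = 0) := by
  by_cases h : xs.count 'a' = 0
  · simp only [h]
    simp [okB, List.replicate_succ, h,
      filter_of_no_a xs h]
  · simp only [h]
    -- count 'a' > 0 : canonical form starts with 'a', filtered starts with 'b'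
    have hpos : 0 < xs.count 'a' := Nat.pos_of_ne_zero h
    simp only [okB, List.filter_cons, List.count_cons]
    obtain ⟨n, hn⟩ : ∃ n, xs.count 'a' = n + 1 := ⟨xs.count 'a' - 1, by omega⟩
    simp [hn, List.replicate_succ]

theorem okB_cons_other (x : Char) (xs : List Char) (ha : x ≠ 'a') (hb : x ≠ 'b') :
    okB (x :: xs) = okB xs := by
  simp [okB, ha, hb]

theorem anbnGo_eq (l : List Char) : ∀ (c : Int) (sw : Bool),
    anbnGo l c sw =
      ((if sw then l.count 'a' == 0 else okB l) &&
        decide (c + l.count 'a' = (l.count 'b' : Int))) := by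
  induction l with
  | nil =>
    intro c sw
    by_cases h : c = 0 <;> cases sw <;> simp [anbnGo, okB, h]
  | cons x xs ih =>
    intro c sw
    by_cases ha : x = 'a'
    · subst ha
      cases sw with
      | true => simp [anbnGo]
      | false =>
        simp only [anbnGo, beq_self_eq_true, if_true, if_false, Bool.false_eq_true, ih]
        have : c + 1 + (xs.count 'a' : Int) = xs.count 'b' ↔
            c + (('a' :: xs).count 'a' : Int) = ('a' :: xs).count 'b' := by
          simp; omega
        simp [okB_cons_a, this]
    · by_cases hb : x = 'b'
      · subst hb
        have hab : ('b' : Char) ≠ 'a' := by decide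
        simp only [anbnGo, beq_iff_eq, hab, if_false, if_true, ih]
        have : c - 1 + (xs.count 'a' : Int) = xs.count 'b' ↔
            c + (('b' :: xs).count 'a' : Int) = ('b' :: xs).count 'b' := by
          simp; omega
        by_cases hc : xs.count 'a' = 0 <;> cases sw <;>
          simp [okB_cons_b, this, hc] <;> omega
      · simp only [anbnGo, beq_iff_eq, ha, hb, if_false, ih]
        simp [okB_cons_other x xs ha hb, ha, hb]

-- ===== VERDICT (by name: the statement is the Claim_ definition above) =====
theorem anbn_checker_spec : Claim_equal_anbn_checker := by
  intro s _
  unfold Spec_anbn_checker anbn_checker anbn_checker_alt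
  rw [anbnGo_eq]
  simp only [if_false, Bool.false_eq_true]
  by_cases h : s.toList.count 'a' = s.toList.count 'b' <;>
    simp [okB, h, Bool.and_comm]
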